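-- pv_equiv track=rewrite | github.com/hitiminid/security-of-embedded-systems | List_2/Assigment_3/random_detection/monobit.py | produce_convertion_sum
-- ===== SOURCE A (Python) =====
-- def produce_convertion_sum(bits: str):
-- 	"""
-- 	Convert all ones to +1 and zeros to -1 and then compute their sum.
-- 	"""
-- 	conv_sum = 0
-- 	for bit in bits:
-- 		if bit == '0':
-- 			conv_sum = conv_sum - 1
-- 		else:
-- 			conv_sum = conv_sum + 1
-- 	return conv_sum
-- ===== SOURCE B (Python) =====
-- def produce_convertion_sum(bits: str):
--     """Closed form: every non-'0' char adds +1, each '0' adds -1."""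
--     return len(bits) - 2 * bits.count('0')
-- ===== Notes on version B (the rewrite author's own statement) =====
-- stated objective: simpler
-- what changed: Replaced the branching accumulator loop with the closed form len(bits) - 2*bits.count('0'), using that only '0' maps to -1 and every other character to +1.
import Mathlib
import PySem

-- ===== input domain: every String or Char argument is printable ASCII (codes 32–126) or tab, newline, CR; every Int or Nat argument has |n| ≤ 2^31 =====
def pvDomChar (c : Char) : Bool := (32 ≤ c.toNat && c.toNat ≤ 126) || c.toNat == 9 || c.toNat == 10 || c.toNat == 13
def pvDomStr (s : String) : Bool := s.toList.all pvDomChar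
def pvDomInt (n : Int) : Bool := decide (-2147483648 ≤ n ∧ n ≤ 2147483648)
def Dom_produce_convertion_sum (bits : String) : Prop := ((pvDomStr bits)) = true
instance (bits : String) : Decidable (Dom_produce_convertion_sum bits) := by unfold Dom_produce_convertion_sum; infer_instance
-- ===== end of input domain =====

-- B replaces A's branching accumulator loop by the closed form len(bits) - 2*bits.count('0') (simpler).

-- ===== PORT A =====
-- literal transliteration: fold over the characters, branch on bit == '0'
def produce_convertion_sum (bits : String) : Int :=
  bits.toList.foldl (fun conv_sum bit => if bit = '0' then conv_sum - 1 else conv_sum + 1) 0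

-- ===== PORT B =====
def produce_convertion_sum_alt (bits : String) : Int :=
  (PySem.Str.len bits : Int) - 2 * (PySem.Str.count bits "0" : Int)

-- ===== PRECONDITION & SPEC =====
def Spec_produce_convertion_sum (bits : String) (out : Int) : Prop := out = produce_convertion_sum_alt bits
instance (bits : String) (out : Int) : Decidable (Spec_produce_convertion_sum bits out) := by unfold Spec_produce_convertion_sum; infer_instance

-- ===== CLAIM (what is proved, stated in full; the proofs are below) =====
def Claim_equal_produce_convertion_sum : Prop := ∀ (bits : String), Dom_produce_convertion_sum bits → Spec_produce_convertion_sum bits (produce_convertion_sum bits)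

-- ===== LEMMAS AND PROOFS =====

-- A's loop with accumulator a equals a plus the loop started at 0.
theorem pv_foldl_shift (l : List Char) (a : Int) :
    l.foldl (fun conv_sum bit => if bit = '0' then conv_sum - 1 else conv_sum + 1) a
      = a + l.foldl (fun conv_sum bit => if bit = '0' then conv_sum - 1 else conv_sum + 1) 0 := by
  induction l generalizing a with
  | nil => simp
  | cons c t ih =>
    simp only [List.foldl_cons]
    rw [ih, ih (if c = '0' then (0:Int) - 1 else 0 + 1)]
    split_ifs <;> ring

-- PySem's fuelled substring-count, for the one-char needle "0", is List.count.
theorem pv_go (fuel : Nat) (l : List Char) (acc : Nat) (h : l.length ≤ fuel) :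
    PySem.Chars.count.go ['0'] fuel l acc = acc + l.count '0' := by
  induction fuel generalizing l acc with
  | zero =>
    cases l with
    | nil => simp [PySem.Chars.count.go]
    | cons c t => simp at h
  | succ n ih =>
    cases l with
    | nil => simp [PySem.Chars.count.go]
    | cons c t =>
      simp only [PySem.Chars.count.go]
      split_ifs with hcond
      · have hc : c = '0' := by
          have := hcond
          simp [List.isPrefixOf] at this
          exact this.symm
        subst hc
        simp only [List.length_cons, List.drop_succ_cons]
        rw [ih _ _ (by simpa using Nat.le_of_succ_le_succ h)]
        simp
        omega
      · have hc : c ≠ '0' := by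
          intro e
          exact hcond (by simp [List.isPrefixOf, e])
        rw [ih _ _ (by simpa using Nat.le_of_succ_le_succ h)]
        simp [hc]

theorem pv_count_zero (bits : String) :
    PySem.Str.count bits "0" = bits.toList.count '0' := by
  rw [PySem.Str.count_eq]
  show PySem.Chars.count bits.toList ['0'] = _
  unfold PySem.Chars.count
  simp only [List.isEmpty_cons, if_neg Bool.false_ne_true]
  rw [pv_go _ _ _ le_rfl]
  simp

-- A's loop in closed form: length minus twice the number of '0' characters.
theorem pv_key (l : List Char) :
    l.foldl (fun conv_sum bit => if bit = '0' then conv_sum - 1 else conv_sum + 1) 0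
      = (l.length : Int) - 2 * (l.count '0' : Int) := by
  induction l with
  | nil => simp
  | cons c t ih =>
    simp only [List.foldl_cons, List.count_cons, List.length_cons]
    rw [pv_foldl_shift, ih]
    by_cases h : c = '0' <;> simp [h] <;> ring

-- ===== VERDICT (by name: the statement is the Claim_ definition above) =====
theorem produce_convertion_sum_spec : Claim_equal_produce_convertion_sum := by
  intro bits _
  unfold Spec_produce_convertion_sum produce_convertion_sum produce_convertion_sum_alt
  rw [pv_key, pv_count_zero, PySem.Str.len_eq]
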